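-- pv_equiv track=rewrite | github.com/33ueowon/PythonCosPro | GoormEx5-10.py | solution
-- ===== SOURCE A (Python) =====
-- def solution(time_table, n):
-- 	answer = 0
-- 	sum_list = [0] * n
-- 	index = 0
-- 	for time in time_table:
-- 		sum_list[index % n] += time
-- 		index += 1
-- 		# if index == n:
-- 		# 	index = 0
-- 	answer = max(sum_list)
-- 	return answer
-- ===== SOURCE B (Python) =====
-- def solution(time_table, n):
--     totals = [sum(time_table[p] for p in range(j, len(time_table), n)) for j in range(n)]
--     return max(totals)
-- ===== Notes on version B (the rewrite author's own statement) =====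
-- stated objective: simpler
-- what changed: Instead of one pass routing each element to bucket index%n inside a mutable list, B computes each bucket total directly as the sum of the stride time_table[j], time_table[j+n], ... for each j in range(n), and takes the max of those totals.
import Mathlib
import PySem

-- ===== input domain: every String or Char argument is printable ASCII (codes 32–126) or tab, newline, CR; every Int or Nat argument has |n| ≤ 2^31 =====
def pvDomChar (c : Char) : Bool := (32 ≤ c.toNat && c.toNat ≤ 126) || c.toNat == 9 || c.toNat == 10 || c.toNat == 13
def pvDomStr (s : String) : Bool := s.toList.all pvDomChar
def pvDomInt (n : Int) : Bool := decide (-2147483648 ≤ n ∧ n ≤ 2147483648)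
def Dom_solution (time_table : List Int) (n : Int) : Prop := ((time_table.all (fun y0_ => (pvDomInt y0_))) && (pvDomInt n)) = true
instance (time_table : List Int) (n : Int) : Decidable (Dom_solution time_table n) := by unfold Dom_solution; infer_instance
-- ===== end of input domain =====

-- B replaces A's single pass that routes each element to bucket index % n by a direct
-- per-bucket sum over the stride j, j+n, ... for each bucket j (objective: simpler).


-- ===== PORT A =====
-- sum_list = [0]*n; for time in time_table: sum_list[index % n] += time; index += 1; return max(sum_list)
def solution (time_table : List Int) (n : Int) : Int :=
  let sum_list : List Int := List.replicate n.toNat 0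
  let res := time_table.foldl
    (fun (st : List Int × Int) time =>
      let i := PySem.Int.mod st.2 n
      (PySem.List.pySetD st.1 i (PySem.List.pyGetD st.1 i 0 + time), st.2 + 1))
    (sum_list, 0)
  ((PySem.List.max? res.1 (fun x => x)).getD 0)

-- ===== PORT B =====
-- totals = [sum(time_table[p] for p in range(j, len(time_table), n)) for j in range(n)]; return max(totals)
def solution_alt (time_table : List Int) (n : Int) : Int :=
  let totals : List Int := (PySem.List.pyRange 0 n 1).map (fun j =>
    (PySem.List.pyRange j (time_table.length : Int) n).foldl
      (fun acc p => acc + PySem.List.pyGetD time_table p 0) 0)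
  ((PySem.List.max? totals (fun x => x)).getD 0)

-- ===== PRECONDITION & SPEC =====
-- A raises whenever n ≤ 0 (ZeroDivisionError/IndexError for nonempty time_table, ValueError from max([]) otherwise); it returns normally exactly when n ≥ 1.
def Pre_solution (time_table : List Int) (n : Int) : Prop := 1 ≤ n
instance (time_table : List Int) (n : Int) : Decidable (Pre_solution time_table n) := by unfold Pre_solution; infer_instance
def pvWitness_solution : List Int × Int := ([3, 1, 4, 1, 5], 2)
def Spec_solution (time_table : List Int) (n : Int) (out : Int) : Prop := out = solution_alt time_table n
instance (time_table : List Int) (n : Int) (out : Int) : Decidable (Spec_solution time_table n out) := by unfold Spec_solution; infer_instance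

-- ===== CLAIM (what is proved, stated in full; the proofs are below) =====
def Claim_equal_solution : Prop := ∀ (time_table : List Int) (n : Int), Dom_solution time_table n → Pre_solution time_table n → Spec_solution time_table n (solution time_table n)

-- ===== LEMMAS AND PROOFS =====

-- sum of the stride j, j+n, j+2n, … of a list, by structural recursion
def strideSum (n : Int) : List Int → Int → Int
  | [], _ => 0
  | t :: tt, j => if j = 0 then t + strideSum n tt (n - 1) else strideSum n tt (j - 1)

theorem consShift (t : Int) (tt : List Int) (p : Int) (hp : 1 ≤ p) :
    PySem.List.pyGetD (t :: tt) p 0 = PySem.List.pyGetD tt (p - 1) 0 := by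
  have h1 : p = (((p.toNat - 1 : Nat) + 1 : Nat) : Int) := by omega
  rw [h1]
  have h2 : ((((p.toNat - 1 : Nat) + 1 : Nat) : Int)) - 1 = ((p.toNat - 1 : Nat) : Int) := by
    push_cast; ring
  rw [h2, PySem.List.pyGetD_natCast, PySem.List.pyGetD_natCast]
  simp [List.getD]

-- the mapped stride of a cons, shifted into the tail
theorem getsLem (n : Int) (hn : 0 < n) (t : Int) (tt : List Int) (j : Int)
    (hj0 : 0 ≤ j) (hjn : j < n) :
    (PySem.List.pyRange j ((t :: tt).length : Int) n).map (fun p => PySem.List.pyGetD (t :: tt) p 0)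
    = if j = 0 then t :: (PySem.List.pyRange (n - 1) (tt.length : Int) n).map (fun p => PySem.List.pyGetD tt p 0)
      else (PySem.List.pyRange (j - 1) (tt.length : Int) n).map (fun p => PySem.List.pyGetD tt p 0) := by
  have hL : (0 : Int) ≤ (tt.length : Int) := by positivity
  by_cases h : j = 0
  · subst h
    rw [if_pos rfl, PySem.List.pyRange_of_pos _ _ hn, PySem.List.pyRange_of_pos _ _ hn]
    -- counts: ((L+1) + n - 1)/n = L/n + 1 ; tail count = L/n
    have hlen : ((t :: tt).length : Int) = (tt.length : Int) + 1 := by simp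
    have hcond : (0 : Int) < ((t :: tt).length : Int) := by simp
    have hc : (if (0 : Int) < ((t :: tt).length : Int) then
        ((((t :: tt).length : Int) - 0 + n - 1) / n).toNat else 0)
        = ((tt.length : Int) / n).toNat + 1 := by
      rw [if_pos hcond, hlen]
      have : ((tt.length : Int) + 1 - 0 + n - 1) = (tt.length : Int) + 1 * n := by ring
      rw [this, Int.add_mul_ediv_right _ _ (by omega : n ≠ 0)]
      have hq : (0 : Int) ≤ (tt.length : Int) / n := Int.ediv_nonneg hL (by omega)
      omega
    have hc' : (if n - 1 < (tt.length : Int) then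
        (((tt.length : Int) - (n - 1) + n - 1) / n).toNat else 0)
        = ((tt.length : Int) / n).toNat := by
      by_cases hb : n - 1 < (tt.length : Int)
      · rw [if_pos hb]
        congr 1
        congr 1
        ring
      · rw [if_neg hb]
        have : (tt.length : Int) / n = 0 := Int.ediv_eq_zero_of_lt hL (by omega)
        omega
    rw [hc, hc']
    simp only [List.range_succ_eq_map, List.map_map, List.map_cons, List.cons.injEq]
    refine ⟨by simp [PySem.List.pyGetD_zero_cons], ?_⟩
    apply List.map_congr_left
    intro k _
    simp only [Function.comp]
    have hk0 : (0 : Int) ≤ n * (k : Int) := by positivity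
    have hexp : (0 : Int) + n * ((k + 1 : Nat) : Int) = n * (k : Int) + n := by push_cast; ring
    have h1' : (1 : Int) ≤ 0 + n * ((k + 1 : Nat) : Int) := by omega
    rw [consShift t tt _ h1']
    congr 1
    push_cast
    ring
  · rw [if_neg h, PySem.List.pyRange_of_pos _ _ hn, PySem.List.pyRange_of_pos _ _ hn]
    have hcc : (if j < ((t :: tt).length : Int) then
        ((((t :: tt).length : Int) - j + n - 1) / n).toNat else 0)
        = (if j - 1 < (tt.length : Int) then
        (((tt.length : Int) - (j - 1) + n - 1) / n).toNat else 0) := by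
      have hlen : ((t :: tt).length : Int) = (tt.length : Int) + 1 := by simp
      rw [hlen]
      have hiff : (j < (tt.length : Int) + 1) ↔ (j - 1 < (tt.length : Int)) := by omega
      have hnum : ((tt.length : Int) + 1 - j + n - 1) = ((tt.length : Int) - (j - 1) + n - 1) := by ring
      rw [hnum]
      by_cases hb : j - 1 < (tt.length : Int)
      · rw [if_pos (hiff.mpr hb), if_pos hb]
      · rw [if_neg (fun hx => hb (hiff.mp hx)), if_neg hb]
    rw [hcc, List.map_map, List.map_map]
    apply List.map_congr_left
    intro k _
    simp only [Function.comp]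
    have hk0 : (0 : Int) ≤ n * (k : Int) := by positivity
    have h1 : (1 : Int) ≤ j + n * (k : Int) := by omega
    rw [consShift t tt _ h1]
    congr 1
    ring

theorem sumStride (n : Int) (hn : 0 < n) (tt : List Int) (j : Int) (hj0 : 0 ≤ j) (hjn : j < n) :
    ((PySem.List.pyRange j (tt.length : Int) n).map (fun p => PySem.List.pyGetD tt p 0)).sum
      = strideSum n tt j := by
  induction tt generalizing j with
  | nil =>
      rw [PySem.List.pyRange_of_pos _ _ hn]
      have hnlt : ¬ (j < (0 : Int)) := by omega
      simp [hnlt, strideSum]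
  | cons t rest ih =>
      rw [getsLem n hn t rest j hj0 hjn]
      by_cases h : j = 0
      · subst h
        rw [if_pos rfl, List.sum_cons, ih (n - 1) (by omega) (by omega)]
        simp [strideSum]
      · rw [if_neg h, ih (j - 1) (by omega) (by omega)]
        simp [strideSum, if_neg h]

theorem innerB (n : Int) (hn : 0 < n) (tt : List Int) (j : Int) (hj0 : 0 ≤ j) (hjn : j < n) :
    (PySem.List.pyRange j (tt.length : Int) n).foldl
      (fun acc p => acc + PySem.List.pyGetD tt p 0) 0 = strideSum n tt j := by
  rw [PySem.List.foldl_add, sumStride n hn tt j hj0 hjn, zero_add]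

-- successor of a modulus
theorem emodSucc (m n : Int) (hn : 0 < n) :
    (m + 1) % n = if m % n = n - 1 then 0 else m % n + 1 := by
  have hdec : m + 1 = (m % n + 1) + n * (m / n) := by
    have := Int.ediv_add_emod m n; omega
  have h2 : (m + 1) % n = (m % n + 1) % n := by
    rw [hdec, Int.add_mul_emod_self_left]
  have hl : 0 ≤ m % n := Int.emod_nonneg m (by omega)
  have hu : m % n < n := Int.emod_lt_of_pos m hn
  by_cases h : m % n = n - 1
  · rw [h2, if_pos h, h]
    simp
  · rw [h2, if_neg h, Int.emod_eq_of_lt (by omega) (by omega)]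

-- offset of bucket j relative to running index m
def off (n : Int) (j : Nat) (m : Int) : Int :=
  if m % n ≤ (j : Int) then (j : Int) - m % n else (j : Int) + n - m % n

-- the loop body of A's port, named for the proofs
def stepA (n : Int) (st : List Int × Int) (time : Int) : List Int × Int :=
  let i := PySem.Int.mod st.2 n
  (PySem.List.pySetD st.1 i (PySem.List.pyGetD st.1 i 0 + time), st.2 + 1)

theorem getD_range_map (sl : List Int) :
    (List.range sl.length).map (fun j => sl.getD j 0) = sl := by
  apply List.ext_getElem
  · simp
  · intro i h1 h2
    simp only [List.getElem_map, List.getElem_range]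
    rw [List.getD_eq_getElem sl 0 h2]

-- main invariant of A's loop
theorem lemA (n : Int) (hn : 0 < n) (tt : List Int) (sl : List Int) (m : Int)
    (hm : 0 ≤ m) (hlen : sl.length = n.toNat) :
    (tt.foldl (stepA n) (sl, m)).1
    = (List.range n.toNat).map (fun j => sl.getD j 0 + strideSum n tt (off n j m)) := by
  induction tt generalizing sl m with
  | nil =>
      simp only [List.foldl_nil, strideSum, add_zero]
      rw [← hlen]
      exact (getD_range_map sl).symm
  | cons t tt ih =>
      rw [List.foldl_cons]
      have hr0 : 0 ≤ m % n := Int.emod_nonneg m (by omega)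
      have hrn : m % n < n := Int.emod_lt_of_pos m hn
      have hstep : stepA n (sl, m) t
          = (PySem.List.pySetD sl (m % n) (PySem.List.pyGetD sl (m % n) 0 + t), m + 1) := by
        simp [stepA, PySem.Int.mod_eq_emod_of_pos hn]
      rw [hstep, ih _ (m + 1) (by omega) (by rw [PySem.List.length_pySetD]; exact hlen)]
      apply List.map_congr_left
      intro j hj
      have hjN : j < n.toNat := List.mem_range.mp hj
      have hjn : (j : Int) < n := by omega
      have hcast : m % n = (((m % n).toNat : Nat) : Int) := by omega
      have hlt : (m % n).toNat < sl.length := by omega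
      have hget : PySem.List.pyGetD (PySem.List.pySetD sl (m % n)
          (PySem.List.pyGetD sl (m % n) 0 + t)) (j : Int) 0
          = if j = (m % n).toNat then PySem.List.pyGetD sl (m % n) 0 + t
            else PySem.List.pyGetD sl (j : Int) 0 := by
        rw [hcast]
        exact PySem.List.pyGetD_pySetD_natCast sl (m % n).toNat j _ 0 hlt
      have hgetD : (PySem.List.pySetD sl (m % n)
          (PySem.List.pyGetD sl (m % n) 0 + t)).getD j 0
          = if j = (m % n).toNat then sl.getD (m % n).toNat 0 + t else sl.getD j 0 := by
        rw [← PySem.List.pyGetD_natCast, hget]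
        rw [hcast, PySem.List.pyGetD_natCast, PySem.List.pyGetD_natCast]
        simp only [List.getD, Int.toNat_natCast]
      rw [hgetD]
      have hsucc := emodSucc m n hn
      by_cases hjr : (j : Int) = m % n
      · have hjr' : j = (m % n).toNat := by omega
        rw [if_pos hjr']
        have hoff0 : off n j m = 0 := by
          unfold off; rw [if_pos (by omega)]; omega
        have hoff1 : off n j (m + 1) = n - 1 := by
          unfold off
          rw [hsucc]
          by_cases hr : m % n = n - 1
          · rw [if_pos hr]
            split_ifs <;> omega
          · rw [if_neg hr]
            split_ifs <;> omega
        rw [hoff0, hoff1]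
        have hs : strideSum n (t :: tt) 0 = t + strideSum n tt (n - 1) := by
          simp [strideSum]
        rw [hs, hjr']
        ring
      · have hjr' : ¬ (j = (m % n).toNat) := by omega
        rw [if_neg hjr']
        have hne : off n j m ≠ 0 := by
          unfold off; split_ifs <;> omega
        have hstep : off n j (m + 1) = off n j m - 1 := by
          unfold off
          rw [hsucc]
          by_cases hr : m % n = n - 1
          · rw [if_pos hr]
            split_ifs <;> omega
          · rw [if_neg hr]
            split_ifs <;> omega
        rw [hstep]
        have : strideSum n (t :: tt) (off n j m) = strideSum n tt (off n j m - 1) := by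
          simp [strideSum, if_neg hne]
        rw [this]

theorem solution_eq (time_table : List Int) (n : Int) (hn : 1 ≤ n) :
    solution time_table n = solution_alt time_table n := by
  have hn0 : (0 : Int) < n := by omega
  unfold solution solution_alt
  simp only []
  congr 1
  have hfun : (fun (st : List Int × Int) time =>
      let i := PySem.Int.mod st.2 n
      (PySem.List.pySetD st.1 i (PySem.List.pyGetD st.1 i 0 + time), st.2 + 1)) = stepA n := rfl
  rw [hfun, lemA n hn0 time_table (List.replicate n.toNat 0) 0 le_rfl (by simp)]
  rw [PySem.List.pyRange_one, List.map_map]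
  have hcnt : ((n : Int) - 0).toNat = n.toNat := by omega
  rw [hcnt]
  congr 1
  apply List.map_congr_left
  intro k hk
  have hkN : k < n.toNat := List.mem_range.mp hk
  have hkn : ((k : Nat) : Int) < n := by omega
  simp only [Function.comp]
  rw [zero_add, innerB n hn0 time_table (k : Int) (by positivity) hkn]
  have hoff : off n k 0 = (k : Int) := by
    unfold off
    rw [Int.zero_emod]
    rw [if_pos (by omega)]
    ring
  rw [hoff]
  simp

-- ===== VERDICT (by name: the statement is the Claim_ definition above) =====
theorem solution_spec : Claim_equal_solution := by
  intro time_table n _ hpre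
  unfold Spec_solution
  exact solution_eq time_table n hpre
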